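-- pv_equiv track=rewrite | github.com/IntelligentDDS/LogShrink | python_compression/sampler/iterative_clustering.py | merge_template
-- ===== SOURCE A (Python) =====
-- def merge_template(template):
--     # merge all the astrick
--     start = -1
--     new_template = []
--     for i, token in enumerate(template):
--         if token == '<*>':
--             if start == -1:
--                 start = i
--         else:
--             if start == -1:
--                 new_template.append(token)
--             else:
--                 new_template.append('<*>')
--                 new_template.append(token)
--                 start = -1
--     if start != -1:
--         new_template.append('<*>')
--     return new_template
-- ===== SOURCE B (Python) =====
-- def merge_template(template):
--     # run-partition scan: split into maximal runs of equal tokens,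
--     # emit one '<*>' per wildcard run, copy other runs verbatim
--     out = []
--     i = 0
--     n = len(template)
--     while i < n:
--         j = i
--         while j < n and template[j] == template[i]:
--             j += 1
--         if template[i] == '<*>':
--             out.append('<*>')
--         else:
--             out.extend(template[i:j])
--         i = j
--     return out
-- ===== Notes on version B (the rewrite author's own statement) =====
-- stated objective: idiomatic
-- what changed: Replaced the sentinel-index run-state scan with a two-pointer run-partition traversal: the list is split into maximal runs of equal tokens and each wildcard run is emitted as a single '<*>', other runs copied verbatim.
import Mathlib
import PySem

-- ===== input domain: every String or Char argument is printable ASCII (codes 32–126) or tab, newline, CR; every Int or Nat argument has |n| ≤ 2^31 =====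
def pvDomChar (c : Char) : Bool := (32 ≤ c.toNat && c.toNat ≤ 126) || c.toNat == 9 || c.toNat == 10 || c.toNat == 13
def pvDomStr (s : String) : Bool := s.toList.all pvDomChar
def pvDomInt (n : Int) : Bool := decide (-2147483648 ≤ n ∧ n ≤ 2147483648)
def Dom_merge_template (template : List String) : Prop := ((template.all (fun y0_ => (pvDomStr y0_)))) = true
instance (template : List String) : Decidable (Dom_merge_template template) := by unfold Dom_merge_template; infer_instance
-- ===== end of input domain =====

-- B replaces A's sentinel-index run-state scan by a run-partition traversal (split into
-- maximal runs of equal tokens, emit one '<*>' per wildcard run); objective: idiomatic.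

-- ===== PORT A =====
-- A's loop body: state is (start, new_template)
def mergeStep (st : Int × List String) (it : Int × String) : Int × List String :=
  if it.2 = "<*>" then
    (if st.1 = -1 then (it.1, st.2) else st)
  else
    (if st.1 = -1 then (st.1, st.2 ++ [it.2])
     else (-1, st.2 ++ ["<*>", it.2]))

def merge_template (template : List String) : List String :=
  let p := (PySem.List.enumerate template 0).foldl mergeStep (-1, ([] : List String))
  if p.1 ≠ -1 then p.2 ++ ["<*>"] else p.2

-- ===== PORT B =====
-- Source B's outer while: take the maximal run of the head token (inner while = takeWhile),
-- emit, continue on the rest (dropWhile).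
def mergeRuns : List String → List String
  | [] => []
  | t :: rest =>
      (if t = "<*>" then ["<*>"] else t :: rest.takeWhile (fun x => x == t))
        ++ mergeRuns (rest.dropWhile (fun x => x == t))
termination_by l => l.length
decreasing_by
  exact Nat.lt_succ_of_le (List.length_dropWhile_le _ _)

def merge_template_alt (template : List String) : List String := mergeRuns template

-- ===== PRECONDITION & SPEC =====
def Spec_merge_template (template : List String) (out : List String) : Prop := out = merge_template_alt template
instance (template : List String) (out : List String) : Decidable (Spec_merge_template template out) := by unfold Spec_merge_template; infer_instance

-- ===== CLAIM (what is proved, stated in full; the proofs are below) =====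
def Claim_equal_merge_template : Prop := ∀ (template : List String), Dom_merge_template template → Spec_merge_template template (merge_template template)

-- ===== LEMMAS AND PROOFS =====

-- A's final step (append '<*>' iff a run is open)
def finA (p : Int × List String) : List String := if p.1 ≠ -1 then p.2 ++ ["<*>"] else p.2

lemma mergeRuns_cons_ne (t : String) (ht : ¬ t = "<*>") (rest : List String) :
    mergeRuns (t :: rest) = t :: mergeRuns rest := by
  have key : ∀ (r : List String),
      mergeRuns r = r.takeWhile (fun x => x == t) ++ mergeRuns (r.dropWhile (fun x => x == t)) := by
    intro r
    cases r with
    | nil => simp [mergeRuns]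
    | cons x xs =>
      by_cases hx : x = t
      · subst hx
        rw [mergeRuns]
        simp [ht]
      · simp [hx]
  rw [mergeRuns]
  simp [ht, (key rest).symm]

lemma loop_main : ∀ (l : List String),
    (∀ (i : Int), 0 ≤ i → ∀ (acc : List String),
      finA ((PySem.List.enumerate l i).foldl mergeStep (-1, acc)) = acc ++ mergeRuns l)
  ∧ (∀ (i : Int), 0 ≤ i → ∀ (s : Int), ¬ s = -1 → ∀ (acc : List String),
      finA ((PySem.List.enumerate l i).foldl mergeStep (s, acc))
        = acc ++ "<*>" :: mergeRuns (l.dropWhile (fun x => x == "<*>"))) := by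
  intro l
  induction l with
  | nil =>
    constructor
    · intro i _ acc
      simp [PySem.List.enumerate, finA, mergeRuns]
    · intro i _ s hs acc
      simp [PySem.List.enumerate, finA, hs, mergeRuns]
  | cons t rest ih =>
    obtain ⟨ihneg, ihpos⟩ := ih
    constructor
    · intro i hi acc
      rw [PySem.List.enumerate_cons, List.foldl_cons]
      by_cases ht : t = "<*>"
      · have hstep : mergeStep (-1, acc) (i, t) = (i, acc) := by simp [mergeStep, ht]
        rw [hstep, ihpos (i + 1) (by omega) i (by omega) acc]
        subst ht
        rw [mergeRuns]
        simp
      · have hstep : mergeStep (-1, acc) (i, t) = (-1, acc ++ [t]) := by simp [mergeStep, ht]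
        rw [hstep, ihneg (i + 1) (by omega) (acc ++ [t]), mergeRuns_cons_ne t ht rest]
        simp
    · intro i hi s hs acc
      rw [PySem.List.enumerate_cons, List.foldl_cons]
      by_cases ht : t = "<*>"
      · have hstep : mergeStep (s, acc) (i, t) = (s, acc) := by simp [mergeStep, ht, hs]
        rw [hstep, ihpos (i + 1) (by omega) s hs acc]
        subst ht
        simp
      · have hstep : mergeStep (s, acc) (i, t) = (-1, acc ++ ["<*>", t]) := by
          simp [mergeStep, ht, hs]
        rw [hstep, ihneg (i + 1) (by omega) (acc ++ ["<*>", t])]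
        rw [List.dropWhile_cons_of_neg (by simpa using ht), mergeRuns_cons_ne t ht rest]
        simp

-- ===== VERDICT (by name: the statement is the Claim_ definition above) =====
theorem merge_template_spec : Claim_equal_merge_template := by
  intro template _
  unfold Spec_merge_template merge_template merge_template_alt
  have h := (loop_main template).1 0 (by omega) []
  simpa [finA] using h
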